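-- pv_equiv track=rewrite | github.com/casacosmos/screeneragent | WetlandsINFO/wetlands_client.py | _decode_nwi_attribute
-- ===== SOURCE A (Python) =====
-- def _decode_nwi_attribute(attribute_code: str) -> str:
--     """
--     Decode NWI attribute codes to human-readable descriptions.
--
--     This is a simplified decoder - full NWI classification is complex.
--     """
--     if not attribute_code:
--         return "Unknown wetland type"
--
--     # Basic NWI code patterns
--     descriptions = {
--         'PEM': 'Palustrine Emergent Wetland',
--         'PFO': 'Palustrine Forested Wetland',
--         'PSS': 'Palustrine Scrub-Shrub Wetland',
--         'PUB': 'Palustrine Unconsolidated Bottom',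
--         'PAB': 'Palustrine Aquatic Bed',
--         'POW': 'Palustrine Open Water',
--         'L1': 'Lacustrine Limnetic',
--         'L2': 'Lacustrine Littoral',
--         'R1': 'Riverine Tidal',
--         'R2': 'Riverine Lower Perennial',
--         'R3': 'Riverine Upper Perennial',
--         'R4': 'Riverine Intermittent',
--         'R5': 'Riverine Unknown Perennial',
--         'E1': 'Estuarine Subtidal',
--         'E2': 'Estuarine Intertidal',
--         'M1': 'Marine Subtidal',
--         'M2': 'Marine Intertidal'
--     }
--
--     # Try to match the beginning of the code
--     for code, description in descriptions.items():
--         if attribute_code.startswith(code):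
--             return description
--
--     return f"Wetland ({attribute_code})"
-- ===== SOURCE B (Python) =====
-- def _decode_nwi_attribute(attribute_code: str) -> str:
--     if not attribute_code:
--         return "Unknown wetland type"
--     head = attribute_code[0]
--     if head == 'P':
--         sub = {'EM': 'Emergent Wetland', 'FO': 'Forested Wetland',
--                'SS': 'Scrub-Shrub Wetland', 'UB': 'Unconsolidated Bottom',
--                'AB': 'Aquatic Bed', 'OW': 'Open Water'}.get(attribute_code[1:3])
--         if sub is not None:
--             return 'Palustrine ' + sub
--     elif head == 'L':
--         sub = {'1': 'Limnetic', '2': 'Littoral'}.get(attribute_code[1:2])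
--         if sub is not None:
--             return 'Lacustrine ' + sub
--     elif head == 'R':
--         sub = {'1': 'Tidal', '2': 'Lower Perennial', '3': 'Upper Perennial',
--                '4': 'Intermittent', '5': 'Unknown Perennial'}.get(attribute_code[1:2])
--         if sub is not None:
--             return 'Riverine ' + sub
--     elif head == 'E':
--         sub = {'1': 'Subtidal', '2': 'Intertidal'}.get(attribute_code[1:2])
--         if sub is not None:
--             return 'Estuarine ' + sub
--     elif head == 'M':
--         sub = {'1': 'Subtidal', '2': 'Intertidal'}.get(attribute_code[1:2])
--         if sub is not None:
--             return 'Marine ' + sub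
--     return f"Wetland ({attribute_code})"
-- ===== Notes on version B (the rewrite author's own statement) =====
-- stated objective: alternative
-- what changed: Replaced A's linear startswith-scan over one flat 17-entry code-to-description dict by a dispatch on the first character (the wetland system) with a small per-system subtype table, concatenating the system name with the subtype name; the scanning loop and the flat table are gone.
import Mathlib
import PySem

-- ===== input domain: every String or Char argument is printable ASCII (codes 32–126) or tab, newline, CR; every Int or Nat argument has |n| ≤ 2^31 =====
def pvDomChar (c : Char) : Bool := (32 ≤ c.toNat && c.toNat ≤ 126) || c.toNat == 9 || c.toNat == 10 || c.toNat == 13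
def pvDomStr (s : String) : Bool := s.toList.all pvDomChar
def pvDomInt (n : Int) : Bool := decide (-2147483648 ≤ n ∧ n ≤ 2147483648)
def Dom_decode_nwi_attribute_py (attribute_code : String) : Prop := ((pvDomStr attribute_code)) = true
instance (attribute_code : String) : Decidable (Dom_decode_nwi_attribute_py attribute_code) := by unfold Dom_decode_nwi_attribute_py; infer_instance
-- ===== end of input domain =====

-- B decodes by dispatching on the first character (system) and composing the description as system name plus subtype from a
-- per-system subtype table, instead of A's startswith-scan over one flat 17-entry dict (alternative decomposition).

-- ===== PORT A =====
-- the dict literal of A, in insertion order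
def pvDescriptions : List (String × String) :=
  [("PEM", "Palustrine Emergent Wetland"),
   ("PFO", "Palustrine Forested Wetland"),
   ("PSS", "Palustrine Scrub-Shrub Wetland"),
   ("PUB", "Palustrine Unconsolidated Bottom"),
   ("PAB", "Palustrine Aquatic Bed"),
   ("POW", "Palustrine Open Water"),
   ("L1", "Lacustrine Limnetic"),
   ("L2", "Lacustrine Littoral"),
   ("R1", "Riverine Tidal"),
   ("R2", "Riverine Lower Perennial"),
   ("R3", "Riverine Upper Perennial"),
   ("R4", "Riverine Intermittent"),
   ("R5", "Riverine Unknown Perennial"),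
   ("E1", "Estuarine Subtidal"),
   ("E2", "Estuarine Intertidal"),
   ("M1", "Marine Subtidal"),
   ("M2", "Marine Intertidal")]

-- 'for code, description in descriptions.items(): if attribute_code.startswith(code): return description'
def pvScanA (attribute_code : String) : List (String × String) → Option String
  | [] => none
  | (code, description) :: rest =>
      if PySem.Str.startswith attribute_code code then some description
      else pvScanA attribute_code rest

def decode_nwi_attribute_py (attribute_code : String) : String :=
  if attribute_code = "" then "Unknown wetland type"
  else
    match pvScanA attribute_code pvDescriptions with
    | some description => description
    | none => "Wetland (" ++ attribute_code ++ ")"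

-- ===== PORT B =====
def pvSubP : PySem.Dict String String :=
  PySem.Dict.mk
    [("EM", "Emergent Wetland"), ("FO", "Forested Wetland"), ("SS", "Scrub-Shrub Wetland"),
     ("UB", "Unconsolidated Bottom"), ("AB", "Aquatic Bed"), ("OW", "Open Water")]

def pvSubL : PySem.Dict String String :=
  PySem.Dict.mk [("1", "Limnetic"), ("2", "Littoral")]

def pvSubR : PySem.Dict String String :=
  PySem.Dict.mk
    [("1", "Tidal"), ("2", "Lower Perennial"), ("3", "Upper Perennial"),
     ("4", "Intermittent"), ("5", "Unknown Perennial")]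

def pvSubE : PySem.Dict String String :=
  PySem.Dict.mk [("1", "Subtidal"), ("2", "Intertidal")]

def pvSubM : PySem.Dict String String :=
  PySem.Dict.mk [("1", "Subtidal"), ("2", "Intertidal")]

def decode_nwi_attribute_py_alt (attribute_code : String) : String :=
  if attribute_code = "" then "Unknown wetland type"
  else
    match PySem.Str.pyGet? attribute_code 0 with
    | none => "Wetland (" ++ attribute_code ++ ")"   -- unreachable: attribute_code ≠ ""
    | some head =>
      if head = 'P' then
        match pvSubP.get? (PySem.Str.slice attribute_code (some 1) (some 3)) with
        | some sub => "Palustrine " ++ sub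
        | none => "Wetland (" ++ attribute_code ++ ")"
      else if head = 'L' then
        match pvSubL.get? (PySem.Str.slice attribute_code (some 1) (some 2)) with
        | some sub => "Lacustrine " ++ sub
        | none => "Wetland (" ++ attribute_code ++ ")"
      else if head = 'R' then
        match pvSubR.get? (PySem.Str.slice attribute_code (some 1) (some 2)) with
        | some sub => "Riverine " ++ sub
        | none => "Wetland (" ++ attribute_code ++ ")"
      else if head = 'E' then
        match pvSubE.get? (PySem.Str.slice attribute_code (some 1) (some 2)) with
        | some sub => "Estuarine " ++ sub
        | none => "Wetland (" ++ attribute_code ++ ")"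
      else if head = 'M' then
        match pvSubM.get? (PySem.Str.slice attribute_code (some 1) (some 2)) with
        | some sub => "Marine " ++ sub
        | none => "Wetland (" ++ attribute_code ++ ")"
      else "Wetland (" ++ attribute_code ++ ")"

-- ===== PRECONDITION & SPEC =====
def Spec_decode_nwi_attribute_py (attribute_code : String) (out : String) : Prop := out = decode_nwi_attribute_py_alt attribute_code
instance (attribute_code : String) (out : String) : Decidable (Spec_decode_nwi_attribute_py attribute_code out) := by unfold Spec_decode_nwi_attribute_py; infer_instance

-- ===== CLAIM (what is proved, stated in full; the proofs are below) =====
def Claim_equal_decode_nwi_attribute_py : Prop := ∀ (attribute_code : String), Dom_decode_nwi_attribute_py attribute_code → Spec_decode_nwi_attribute_py attribute_code (decode_nwi_attribute_py attribute_code)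

-- ===== LEMMAS AND PROOFS =====

theorem pv_startswith_take (s p : String) :
    PySem.Str.startswith s p = decide (s.toList.take p.toList.length = p.toList) := by
  rw [Bool.eq_iff_iff]
  simp only [PySem.Str.startswith_eq, PySem.Chars.startswith_iff, decide_eq_true_eq]
  rw [List.prefix_iff_eq_take, eq_comm]

theorem pv_main (s : String) : decode_nwi_attribute_py s = decode_nwi_attribute_py_alt s := by
  unfold decode_nwi_attribute_py decode_nwi_attribute_py_alt
  by_cases hs : s = ""
  · simp [hs]
  · rw [if_neg hs, if_neg hs]
    obtain ⟨a, t, hl⟩ : ∃ a t, s.toList = a :: t := by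
      cases hl : s.toList with
      | nil => exact absurd (by simpa using congrArg String.ofList hl) hs
      | cons a t => exact ⟨a, t, rfl⟩
    have hget : PySem.Str.pyGet? s 0 = some a := by simp [pysem, hl]
    have h3 : PySem.Str.slice s (some 1) (some 3) = String.ofList (t.take 2) := by
      apply String.toList_injective; simp [pysem, hl]
    have h2 : PySem.Str.slice s (some 1) (some 2) = String.ofList (t.take 1) := by
      apply String.toList_injective; simp [pysem, hl]
    rw [hget, h3, h2]
    simp only [pvScanA, pvDescriptions, pv_startswith_take, pvSubP, pvSubL, pvSubR, pvSubE, pvSubM,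
      PySem.Dict.get?_mk_cons, beq_iff_eq, hl]
    by_cases hP : a = 'P'
    · subst hP
      simp [String.ext_iff, List.take_succ_cons, eq_comm]
      split_ifs <;> simp [PySem.Dict.get?]
    · by_cases hL : a = 'L'
      · subst hL
        simp [String.ext_iff, List.take_succ_cons, eq_comm]
        split_ifs <;> simp [PySem.Dict.get?]
      · by_cases hR : a = 'R'
        · subst hR
          simp [String.ext_iff, List.take_succ_cons, eq_comm]
          split_ifs <;> simp [PySem.Dict.get?]
        · by_cases hE : a = 'E'
          · subst hE
            simp [String.ext_iff, List.take_succ_cons, eq_comm]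
            split_ifs <;> simp [PySem.Dict.get?]
          · by_cases hM : a = 'M'
            · subst hM
              simp [String.ext_iff, List.take_succ_cons, eq_comm]
              split_ifs <;> simp [PySem.Dict.get?]
            · simp [List.take_succ_cons, hP, hL, hR, hE, hM]

-- ===== VERDICT (by name: the statement is the Claim_ definition above) =====
theorem decode_nwi_attribute_py_spec : Claim_equal_decode_nwi_attribute_py := by
  intro s _
  unfold Spec_decode_nwi_attribute_py
  exact pv_main s
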